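-- pv_equiv track=rewrite | github.com/denisbilli/PyAdventOfCode24 | exercise14.py | is_exit_condition_met
-- ===== SOURCE A (Python) =====
-- def is_exit_condition_met(grid, n=8):
--     for row in grid:
--         consecutive_count = 0
--         for cell in row:
--             if cell == 'X':
--                 consecutive_count += 1
--                 if consecutive_count >= n:
--                     return True
--             else:
--                 consecutive_count = 0
--     return False
-- ===== SOURCE B (Python) =====
-- def _run_len(row):
--     """Length of the leading run of 'X' cells in row."""
--     k = 0
--     while k < len(row) and row[k] == 'X':
--         k += 1
--     return k
--
--
-- def is_exit_condition_met(grid, n=8):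
--     # Run-jumping scan: locate each maximal run of 'X' in a row, test its
--     # full length once, and skip past it (instead of a per-cell counter).
--     for row in grid:
--         i = 0
--         while i < len(row):
--             if row[i] == 'X':
--                 run = _run_len(row[i:])
--                 if run >= n:
--                     return True
--                 i += run
--             else:
--                 i += 1
--     return False
-- ===== Notes on version B (the rewrite author's own statement) =====
-- stated objective: alternative
-- what changed: Replaced the per-cell consecutive counter with a run-jumping scan that finds each maximal run of 'X', tests its full length once, and skips past it.
import Mathlib
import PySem

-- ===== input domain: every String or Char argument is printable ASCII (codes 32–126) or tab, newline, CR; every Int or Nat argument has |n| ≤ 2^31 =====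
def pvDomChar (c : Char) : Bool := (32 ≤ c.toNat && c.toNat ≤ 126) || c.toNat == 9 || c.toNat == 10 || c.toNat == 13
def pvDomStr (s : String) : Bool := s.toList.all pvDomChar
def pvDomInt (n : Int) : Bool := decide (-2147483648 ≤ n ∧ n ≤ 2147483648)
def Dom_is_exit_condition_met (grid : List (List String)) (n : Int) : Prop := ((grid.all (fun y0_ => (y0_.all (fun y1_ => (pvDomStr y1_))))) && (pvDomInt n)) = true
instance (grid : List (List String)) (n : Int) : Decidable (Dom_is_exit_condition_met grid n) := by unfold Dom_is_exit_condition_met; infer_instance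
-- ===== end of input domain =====

-- B replaces A's per-cell consecutive counter with a run-jumping scan (measure each
-- maximal run of 'X' once, test it, skip past it); alternative structure, same cost.

-- ===== PORT A =====
-- inner loop of A: counter c of consecutive 'X' cells, early return True once c reaches n
def loopA (n : Int) : List String → Int → Bool
  | [], _ => false
  | cell :: rest, c =>
    if cell == "X" then
      if c + 1 ≥ n then true else loopA n rest (c + 1)
    else loopA n rest 0

def is_exit_condition_met (grid : List (List String)) (n : Int) : Bool :=
  match grid with
  | [] => false
  | row :: rows => if loopA n row 0 then true else is_exit_condition_met rows n

-- ===== PORT B =====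
-- _run_len: length of the leading run of "X" cells
def runLenX : List String → Nat
  | [] => 0
  | cell :: rest => if cell == "X" then runLenX rest + 1 else 0

-- B's inner while-loop over the remaining suffix row[i:]: at an 'X' measure the whole
-- run (run = runLenX rest + 1), test it, and jump past it; otherwise step one cell
def rowCheckB (n : Int) : List String → Bool
  | [] => false
  | cell :: rest =>
    if cell == "X" then
      if ((runLenX rest : Int) + 1 ≥ n) then true
      else rowCheckB n (List.drop (runLenX rest) rest)
    else rowCheckB n rest
termination_by l => l.length
decreasing_by
  · simp only [List.length_drop, List.length_cons]; omega
  · simp only [List.length_cons]; omega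

def is_exit_condition_met_alt (grid : List (List String)) (n : Int) : Bool :=
  match grid with
  | [] => false
  | row :: rows => if rowCheckB n row then true else is_exit_condition_met_alt rows n

-- ===== PRECONDITION & SPEC =====
def Spec_is_exit_condition_met (grid : List (List String)) (n : Int) (out : Bool) : Prop := out = is_exit_condition_met_alt grid n
instance (grid : List (List String)) (n : Int) (out : Bool) : Decidable (Spec_is_exit_condition_met grid n out) := by unfold Spec_is_exit_condition_met; infer_instance

-- ===== CLAIM (what is proved, stated in full; the proofs are below) =====
def Claim_equal_is_exit_condition_met : Prop := ∀ (grid : List (List String)) (n : Int), Dom_is_exit_condition_met grid n → Spec_is_exit_condition_met grid n (is_exit_condition_met grid n)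

-- ===== LEMMAS AND PROOFS =====

-- rowCheckB's defining equation, restated through the leading run of the WHOLE list
theorem rowCheckB_eq (n : Int) (t : List String) :
    rowCheckB n t =
      ((decide (1 ≤ runLenX t) && decide ((runLenX t : Int) ≥ n)) ||
        rowCheckB n (List.drop (runLenX t) t)) := by
  match t with
  | [] => simp [rowCheckB, runLenX]
  | cell :: rest =>
    by_cases h : cell = "X"
    · subst h
      simp only [rowCheckB, runLenX]
      by_cases hge : ((runLenX rest : Int) + 1 ≥ n)
      · simp [hge]
      · simp [hge]
    · have hb : (cell == "X") = false := by
        simp [BEq.beq]; intro hc; exact absurd hc h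
      simp [rowCheckB, runLenX, hb]

-- loopA with pending counter c, characterised by the leading run and rowCheckB:
-- it fires inside the first run iff c plus that whole run reaches n, else restarts
theorem loopA_eq (n : Int) (t : List String) (c : Int) :
    loopA n t c =
      ((decide (1 ≤ runLenX t) && decide (c + (runLenX t : Int) ≥ n)) ||
        rowCheckB n (List.drop (runLenX t) t)) := by
  induction t generalizing c with
  | nil => simp [loopA, runLenX, rowCheckB]
  | cons cell rest ih =>
    by_cases h : cell = "X"
    · subst h
      simp only [loopA, runLenX, beq_self_eq_true, reduceIte, List.drop_succ_cons]
      by_cases hge : c + 1 ≥ n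
      · have h2 : decide (c + ((runLenX rest + 1 : Nat) : Int) ≥ n) = true := by
          simp only [decide_eq_true_eq]; omega
        rw [if_pos hge, h2]
        simp
      · rw [if_neg hge, ih (c + 1)]
        by_cases h1 : 1 ≤ runLenX rest
        · have e1 : decide (1 ≤ runLenX rest) = true := by simp [h1]
          have e2 : decide (1 ≤ runLenX rest + 1) = true := by simp
          have e3 : decide (c + 1 + (runLenX rest : Int) ≥ n)
              = decide (c + ((runLenX rest + 1 : Nat) : Int) ≥ n) :=
            decide_eq_decide.mpr (by omega)
          rw [e1, e2, Bool.true_and, Bool.true_and, e3]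
        · have h0 : runLenX rest = 0 := by omega
          rw [h0]
          simp
          intro hx
          exact absurd hx hge
    · have hb : (cell == "X") = false := by
        simp [BEq.beq]; intro hc; exact absurd hc h
      have hlen : runLenX (cell :: rest) = 0 := by simp [runLenX, hb]
      simp only [loopA, hb, Bool.false_eq_true, if_false, hlen, List.drop_zero]
      rw [ih 0]
      have hr : rowCheckB n (cell :: rest) = rowCheckB n rest := by
        simp [rowCheckB, hb]
      rw [hr, rowCheckB_eq n rest]
      simp

-- per-row agreement of the two inner loops
theorem row_eq (n : Int) (row : List String) : loopA n row 0 = rowCheckB n row := by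
  rw [loopA_eq]
  conv => rhs; rw [rowCheckB_eq n row]
  simp

theorem main_eq (grid : List (List String)) (n : Int) :
    is_exit_condition_met grid n = is_exit_condition_met_alt grid n := by
  induction grid with
  | nil => rfl
  | cons row rows ih =>
    simp only [is_exit_condition_met, is_exit_condition_met_alt, row_eq, ih]

-- ===== VERDICT (by name: the statement is the Claim_ definition above) =====
theorem is_exit_condition_met_spec : Claim_equal_is_exit_condition_met := by
  intro grid n _
  exact main_eq grid n
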